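-- pv_equiv track=rewrite | github.com/njms-motion-analysis-lab/scoliosis_chart_review | chart_review_scoliosis_time_predictor.py | make_unique_column_names
-- ===== SOURCE A (Python) =====
-- def make_unique_column_names(columns):
--     """
--     Given a list of column names, renames duplicates by appending .1, .2, etc.
--     """
--     new_cols = []
--     name_count = {}
--     for col in columns:
--         if col not in name_count:
--             name_count[col] = 0
--             new_cols.append(col)
--         else:
--             name_count[col] += 1
--             new_cols.append(f"{col}.{name_count[col]}")
--     return new_cols
-- ===== SOURCE B (Python) =====
-- def make_unique_column_names(columns):
--     """
--     Given a list of column names, renames duplicates by appending .1, .2, etc.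
--     Group-then-scatter: collect each name's positions, then write each
--     occurrence (k-th one gets suffix .k) into a preallocated output list.
--     """
--     positions = {}
--     for i, col in enumerate(columns):
--         positions.setdefault(col, []).append(i)
--     out = [None] * len(columns)
--     for col, idxs in positions.items():
--         for k, i in enumerate(idxs):
--             out[i] = col if k == 0 else f"{col}.{k}"
--     return out
-- ===== Notes on version B (the rewrite author's own statement) =====
-- stated objective: alternative
-- what changed: Replaces A's single streaming pass with a running-count dict by a two-phase group-then-scatter algorithm: first build a dict from each name to the list of all its positions, then write each occurrence (the k-th gets suffix .k) into a preallocated output array by index.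
import Mathlib
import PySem

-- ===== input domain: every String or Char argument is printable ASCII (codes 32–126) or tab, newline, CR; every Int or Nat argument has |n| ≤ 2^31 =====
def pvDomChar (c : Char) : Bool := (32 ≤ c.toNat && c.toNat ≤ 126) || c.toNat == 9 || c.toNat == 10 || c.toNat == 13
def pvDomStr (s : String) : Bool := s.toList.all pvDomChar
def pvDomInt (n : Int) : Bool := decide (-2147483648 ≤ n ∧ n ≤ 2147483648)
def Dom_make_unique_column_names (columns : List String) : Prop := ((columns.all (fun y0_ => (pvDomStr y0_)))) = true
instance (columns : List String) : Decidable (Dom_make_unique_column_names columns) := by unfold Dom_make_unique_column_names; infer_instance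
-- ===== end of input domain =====

-- B replaces A's single streaming pass (running-count dict) by a two-phase group-then-scatter
-- algorithm: group each name's positions into a dict, then scatter suffixed names into a
-- preallocated output array (alternative decomposition, not claimed faster).


-- ===== PORT A =====
-- loop state: (new_cols, name_count)
def make_unique_column_names (columns : List String) : List String :=
  (columns.foldl
    (fun (st : List String × PySem.Dict String Int) col =>
      if st.2.contains col = false then
        (st.1 ++ [col], st.2.insert col 0)
      else
        let v := st.2.getD col 0 + 1
        (st.1 ++ [col ++ "." ++ PySem.Int.toStr v], st.2.insert col v))
    ([], PySem.Dict.empty)).1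

-- ===== PORT B =====
-- phase 1: positions[col] = list of indices of col (dict in first-occurrence order);
-- phase 2: out = [None]*n, then out[i] = col / f"{col}.{k}" for the k-th occurrence;
-- the final unwrap of Option is exact: every slot is written (each index occurs in
-- exactly one position list), and indices from enumerate are ≥ 0 so .toNat is exact.
def make_unique_column_names_alt (columns : List String) : List String :=
  let positions : PySem.Dict String (List Int) :=
    (PySem.List.enumerate columns 0).foldl
      (fun d p => d.modify p.2 [] (fun l => l ++ [p.1])) PySem.Dict.empty
  let out0 : List (Option String) := List.replicate columns.length none
  let out := positions.items.foldl
    (fun out pr =>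
      (PySem.List.enumerate pr.2 0).foldl
        (fun (out : List (Option String)) q =>
          out.set q.2.toNat
            (some (if q.1 = 0 then pr.1 else pr.1 ++ "." ++ PySem.Int.toStr q.1)))
        out)
    out0
  out.map (fun o => o.getD "")

-- ===== PRECONDITION & SPEC =====
def Spec_make_unique_column_names (columns : List String) (out : List String) : Prop := out = make_unique_column_names_alt columns
instance (columns : List String) (out : List String) : Decidable (Spec_make_unique_column_names columns out) := by unfold Spec_make_unique_column_names; infer_instance

-- ===== CLAIM (what is proved, stated in full; the proofs are below) =====
def Claim_equal_make_unique_column_names : Prop := ∀ (columns : List String), Dom_make_unique_column_names columns → Spec_make_unique_column_names columns (make_unique_column_names columns)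

-- ===== LEMMAS AND PROOFS =====

-- the rendered name of the k-th occurrence (k = number of earlier occurrences)
def pvValI (c : String) (k : Int) : String :=
  if k = 0 then c else c ++ "." ++ PySem.Int.toStr k

-- reference value of output slot j
def pvExpAt (cols : List String) (j : Nat) : String :=
  pvValI (cols.getD j "") (((cols.take j).count (cols.getD j "") : Int))

-- ---------- A side: A = map of pvExpAt over range ----------

def pvBmap (pref rest : List String) : List String :=
  match rest with
  | [] => []
  | c :: r =>
    (if pref.count c = 0 then c else c ++ "." ++ PySem.Int.toStr (pref.count c : Int))
      :: pvBmap (pref ++ [c]) r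

def pvInv (pref : List String) (d : PySem.Dict String Int) : Prop :=
  ∀ c : String, (d.contains c = true ↔ c ∈ pref) ∧
    (c ∈ pref → d.getD c 0 = (pref.count c : Int) - 1)

lemma pvInv_empty : pvInv [] PySem.Dict.empty := by
  intro c
  simp [PySem.Dict.contains_empty]

lemma pvInv_step_new (pref : List String) (d : PySem.Dict String Int) (c : String)
    (h : pvInv pref d) (hc : d.contains c = false) :
    pvInv (pref ++ [c]) (d.insert c 0) := by
  have hnot : c ∉ pref := by
    intro hm
    have := (h c).1.mpr hm
    simp [this] at hc
  intro c'
  constructor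
  · rw [PySem.Dict.contains_insert]
    by_cases hcc : c' = c
    · simp [hcc]
    · simp [hcc, (h c').1, beq_iff_eq]
  · intro hm
    by_cases hcc : c' = c
    · subst hcc
      have : pref.count c' = 0 := List.count_eq_zero.mpr hnot
      simp [PySem.Dict.getD_insert_self, List.count_append, this]
    · have hm' : c' ∈ pref := by
        rcases List.mem_append.mp hm with h1 | h1
        · exact h1
        · simp at h1; exact absurd h1 hcc
      rw [PySem.Dict.getD_insert, if_neg hcc]
      have hcnt : (pref ++ [c]).count c' = pref.count c' := by
        simp [List.count_append, List.count_singleton]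
        exact fun hh => hcc hh.symm
      rw [hcnt]
      exact (h c').2 hm'

lemma pvInv_step_old (pref : List String) (d : PySem.Dict String Int) (c : String)
    (h : pvInv pref d) (hc : d.contains c = true) :
    pvInv (pref ++ [c]) (d.insert c (d.getD c 0 + 1)) := by
  have hmem : c ∈ pref := (h c).1.mp hc
  intro c'
  constructor
  · rw [PySem.Dict.contains_insert]
    by_cases hcc : c' = c
    · simp [hcc]
    · simp [hcc, (h c').1, beq_iff_eq]
  · intro hm
    by_cases hcc : c' = c
    · subst hcc
      rw [PySem.Dict.getD_insert_self, (h c').2 hmem]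
      simp [List.count_append]
    · have hm' : c' ∈ pref := by
        rcases List.mem_append.mp hm with h1 | h1
        · exact h1
        · simp at h1; exact absurd h1 hcc
      rw [PySem.Dict.getD_insert, if_neg hcc]
      have hcnt : (pref ++ [c]).count c' = pref.count c' := by
        simp [List.count_append, List.count_singleton]
        exact fun hh => hcc hh.symm
      rw [hcnt]
      exact (h c').2 hm'

lemma pvA_loop (rest : List String) :
    ∀ (pref acc : List String) (d : PySem.Dict String Int), pvInv pref d →
    (rest.foldl
      (fun (st : List String × PySem.Dict String Int) col =>
        if st.2.contains col = false then
          (st.1 ++ [col], st.2.insert col 0)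
        else
          let v := st.2.getD col 0 + 1
          (st.1 ++ [col ++ "." ++ PySem.Int.toStr v], st.2.insert col v))
      (acc, d)).1 = acc ++ pvBmap pref rest := by
  induction rest with
  | nil => intro pref acc d _; simp [pvBmap]
  | cons c r ih =>
    intro pref acc d h
    simp only [List.foldl_cons]
    by_cases hc : d.contains c = true
    · have hcnt : pref.count c ≠ 0 := by
        have := (h c).1.mp hc
        simpa [List.count_eq_zero] using (fun hz => (List.count_eq_zero.mp hz) this)
      have hv : d.getD c 0 + 1 = (pref.count c : Int) := by
        rw [(h c).2 ((h c).1.mp hc)]; ring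
      simp only [hc, Bool.true_eq_false, if_false]
      rw [ih (pref ++ [c]) _ _ (pvInv_step_old pref d c h hc)]
      simp [pvBmap, hcnt, hv]
    · have hc' : d.contains c = false := by
        cases hcb : d.contains c
        · rfl
        · exact absurd hcb hc
      have hcnt : pref.count c = 0 := by
        apply List.count_eq_zero.mpr
        intro hm
        exact hc ((h c).1.mpr hm)
      simp only [hc', if_true]
      rw [ih (pref ++ [c]) _ _ (pvInv_step_new pref d c h hc')]
      simp [pvBmap, hcnt]

lemma pvBmap_eq_mapRange (rest : List String) : ∀ (pref : List String),
    pvBmap pref rest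
      = (List.range rest.length).map (fun j => pvExpAt (pref ++ rest) (pref.length + j)) := by
  induction rest with
  | nil => intro pref; simp [pvBmap]
  | cons c r ih =>
    intro pref
    rw [pvBmap, List.length_cons, List.range_succ_eq_map, List.map_cons, List.map_map]
    refine List.cons_eq_cons.mpr ⟨?_, ?_⟩
    · have hget : (pref ++ c :: r).getD (pref.length + 0) "" = c := by simp [List.getD]
      have htake : (pref ++ c :: r).take (pref.length + 0) = pref := by
        simpa using List.take_left (l₁ := pref) (l₂ := c :: r)
      simp [pvExpAt, pvValI]
    · rw [ih (pref ++ [c])]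
      refine List.map_congr_left (fun j hj => ?_)
      have h1 : (pref ++ [c]) ++ r = pref ++ c :: r := by simp
      simp only [Function.comp, h1]
      congr 1
      simp [List.length_append]
      omega

lemma pvA_eq (columns : List String) :
    make_unique_column_names columns
      = (List.range columns.length).map (fun j => pvExpAt columns j) := by
  unfold make_unique_column_names
  rw [pvA_loop columns [] [] PySem.Dict.empty pvInv_empty]
  simpa using pvBmap_eq_mapRange columns []

-- ---------- B side ----------

-- structural mirror of "enumerate(positions of c in cols starting at index m), counter n"
def pvEnum (cols : List String) (c : String) (m n : Int) : List (Int × Int) :=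
  match cols with
  | [] => []
  | x :: r => if x = c then (n, m) :: pvEnum r c (m + 1) (n + 1) else pvEnum r c (m + 1) n

lemma pvEnum_eq (cols : List String) (c : String) : ∀ (m n : Nat),
    pvEnum cols c (m : Int) (n : Int)
      = ((List.range cols.length).filter (fun j => cols.getD j "" = c)).map
          (fun j => (((n + (cols.take j).count c : Nat) : Int), ((m + j : Nat) : Int))) := by
  induction cols with
  | nil => intro m n; simp [pvEnum]
  | cons x r ih =>
    intro m n
    have hfil : (List.filter ((fun j => decide ((x :: r).getD j "" = c)) ∘ Nat.succ) (List.range r.length))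
        = List.filter (fun j => decide (r.getD j "" = c)) (List.range r.length) := by
      refine List.filter_congr (fun j hj => ?_)
      simp [Function.comp]
    rw [pvEnum, List.length_cons, List.range_succ_eq_map, List.filter_cons, List.filter_map]
    by_cases hx : x = c
    · subst hx
      have hm1 : (m : Int) + 1 = ((m + 1 : Nat) : Int) := by push_cast; ring
      have hn1 : (n : Int) + 1 = ((n + 1 : Nat) : Int) := by push_cast; ring
      rw [if_pos rfl, hm1, hn1, ih (m + 1) (n + 1)]
      simp only [List.getD_cons_zero, decide_true, if_true, List.map_cons, List.map_map]
      refine List.cons_eq_cons.mpr ⟨by simp, ?_⟩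
      rw [hfil]
      refine List.map_congr_left (fun j hj => ?_)
      refine Prod.ext ?_ ?_
      · simp only [Function.comp, List.take_succ_cons, List.count_cons_self]
        push_cast; ring
      · simp only [Function.comp]; push_cast; ring
    · have hm1 : (m : Int) + 1 = ((m + 1 : Nat) : Int) := by push_cast; ring
      rw [if_neg hx, hm1, ih (m + 1) n]
      simp only [List.getD_cons_zero, hx, decide_false, Bool.false_eq_true, if_false, List.map_map]
      rw [hfil]
      refine List.map_congr_left (fun j hj => ?_)
      refine Prod.ext ?_ ?_
      · simp [Function.comp, List.take_succ_cons, hx]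
      · simp only [Function.comp]; push_cast; ring

def pvIdxFrom (cols : List String) (c : String) (s : Int) : List Int :=
  ((PySem.List.enumerate cols s).filter (fun p => p.2 == c)).map (fun p => p.1)

lemma pvIdxFrom_cons (x : String) (r : List String) (c : String) (s : Int) :
    pvIdxFrom (x :: r) c s
      = if x = c then s :: pvIdxFrom r c (s + 1) else pvIdxFrom r c (s + 1) := by
  by_cases hx : x = c <;>
    simp [pvIdxFrom, PySem.List.enumerate_cons, hx]

lemma pvEnum_spec (cols : List String) (c : String) : ∀ (s k : Int),
    PySem.List.enumerate (pvIdxFrom cols c s) k = pvEnum cols c s k := by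
  induction cols with
  | nil => intro s k; simp [pvIdxFrom, pvEnum, PySem.List.enumerate_nil]
  | cons x r ih =>
    intro s k
    rw [pvIdxFrom_cons, pvEnum]
    by_cases hx : x = c
    · rw [if_pos hx, if_pos hx, PySem.List.enumerate_cons, ih (s + 1) (k + 1)]
    · rw [if_neg hx, if_neg hx, ih (s + 1) k]

-- generic scatter
def pvSetFold {α : Type} (ws : List (Nat × α)) (l : List α) : List α :=
  ws.foldl (fun l q => l.set q.1 q.2) l

lemma pvSetFold_length {α : Type} (ws : List (Nat × α)) : ∀ (l : List α),
    (pvSetFold ws l).length = l.length := by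
  induction ws with
  | nil => intro l; simp [pvSetFold]
  | cons w t ih => intro l; simpa [pvSetFold] using (ih (l.set w.1 w.2)).trans (by simp)

lemma pvSetFold_get_of_not_mem {α : Type} (ws : List (Nat × α)) :
    ∀ (l : List α) (j : Nat), j ∉ ws.map (fun q => q.1) →
      (pvSetFold ws l)[j]? = l[j]? := by
  induction ws with
  | nil => intro l j _; simp [pvSetFold]
  | cons w t ih =>
    intro l j hj
    simp only [List.map_cons, List.mem_cons, not_or] at hj
    have : (pvSetFold t (l.set w.1 w.2))[j]? = (l.set w.1 w.2)[j]? := ih _ j hj.2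
    rw [pvSetFold, List.foldl_cons]
    rw [show (t.foldl (fun l q => l.set q.1 q.2) (l.set w.1 w.2)) = pvSetFold t (l.set w.1 w.2) from rfl]
    rw [this, List.getElem?_set_ne (fun h => hj.1 h.symm)]

lemma pvSetFold_get_of_mem {α : Type} (ws : List (Nat × α)) :
    ∀ (l : List α) (j : Nat) (v : α), (ws.map (fun q => q.1)).Nodup → (j, v) ∈ ws →
      j < l.length → (pvSetFold ws l)[j]? = some v := by
  induction ws with
  | nil => intro l j v _ hm _; simp at hm
  | cons w t ih =>
    intro l j v hnd hm hj
    simp only [List.map_cons, List.nodup_cons] at hnd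
    rw [pvSetFold, List.foldl_cons,
      show (t.foldl (fun l q => l.set q.1 q.2) (l.set w.1 w.2)) = pvSetFold t (l.set w.1 w.2) from rfl]
    rcases List.mem_cons.mp hm with heq | hmem
    · have hw1 : w.1 = j := by rw [← heq]
      have hw2 : w.2 = v := by rw [← heq]
      subst hw1; subst hw2
      rw [pvSetFold_get_of_not_mem t _ _ hnd.1, List.getElem?_set_self hj]
    · exact ih _ j v hnd.2 hmem (by simpa using hj)

-- the full write list of phase 2
def pvW (columns : List String) : List (Nat × Option String) :=
  (PySem.Set.ofList columns).flatMap
    (fun c => (pvEnum columns c 0 0).map (fun q => (q.2.toNat, some (pvValI c q.1))))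

lemma pvEnum00 (columns : List String) (c : String) :
    pvEnum columns c 0 0
      = ((List.range columns.length).filter (fun j => columns.getD j "" = c)).map
          (fun j => ((((columns.take j).count c : Nat) : Int), ((j : Nat) : Int))) := by
  simpa using pvEnum_eq columns c 0 0

lemma pvChunk_fst (columns : List String) (c : String) :
    ((pvEnum columns c 0 0).map (fun q => (q.2.toNat, some (pvValI c q.1)))).map
        (fun q => q.1)
      = (List.range columns.length).filter (fun j => columns.getD j "" = c) := by
  rw [pvEnum00, List.map_map, List.map_map]
  conv_rhs => rw [← List.map_id ((List.range columns.length).filter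
    (fun j => columns.getD j "" = c))]
  refine List.map_congr_left (fun j hj => ?_)
  simp

lemma pvW_mem (columns : List String) (j : Nat) (hj : j < columns.length) :
    (j, some (pvExpAt columns j)) ∈ pvW columns := by
  have hc : columns.getD j "" ∈ columns := by
    rw [List.getD_eq_getElem columns "" hj]
    exact List.getElem_mem hj
  refine List.mem_flatMap.mpr ⟨columns.getD j "", (PySem.Set.mem_ofList _ _).mpr hc, ?_⟩
  refine List.mem_map.mpr
    ⟨((((columns.take j).count (columns.getD j "") : Nat) : Int), ((j : Nat) : Int)), ?_, ?_⟩
  · rw [pvEnum00]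
    exact List.mem_map.mpr ⟨j, List.mem_filter.mpr ⟨List.mem_range.mpr hj, by simp⟩, rfl⟩
  · simp [pvExpAt]

lemma pvW_nodup (columns : List String) :
    ((pvW columns).map (fun q => q.1)).Nodup := by
  unfold pvW
  rw [List.map_flatMap, List.nodup_flatMap]
  constructor
  · intro c _
    rw [pvChunk_fst]
    exact List.nodup_range.filter _
  · refine (PySem.Set.nodup_ofList columns).imp ?_
    intro a b hne
    intro j hja hjb
    simp only [pvChunk_fst] at hja hjb
    have h1 := (List.mem_filter.mp hja).2
    have h2 := (List.mem_filter.mp hjb).2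
    simp only [decide_eq_true_eq] at h1 h2
    exact hne (h1 ▸ h2 ▸ rfl)

lemma pvSetFold_append {α : Type} (w1 w2 : List (Nat × α)) (l : List α) :
    pvSetFold (w1 ++ w2) l = pvSetFold w2 (pvSetFold w1 l) := by
  simp [pvSetFold, List.foldl_append]

lemma pvEnumerate_snd (cols : List String) : ∀ (s : Int),
    (PySem.List.enumerate cols s).map (fun p => p.2) = cols := by
  induction cols with
  | nil => intro s; simp [PySem.List.enumerate_nil]
  | cons x r ih => intro s; rw [PySem.List.enumerate_cons, List.map_cons, ih]

lemma pvOuter (columns : List String) (items : List (String × List Int))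
    (h : ∀ pr ∈ items, pr.2 = pvIdxFrom columns pr.1 0) : ∀ (out : List (Option String)),
    items.foldl
      (fun out pr =>
        (PySem.List.enumerate pr.2 0).foldl
          (fun (out : List (Option String)) q =>
            out.set q.2.toNat
              (some (if q.1 = 0 then pr.1 else pr.1 ++ "." ++ PySem.Int.toStr q.1)))
          out)
      out
    = pvSetFold
        (items.flatMap (fun pr => (pvEnum columns pr.1 0 0).map
          (fun q => (q.2.toNat, some (pvValI pr.1 q.1)))))
        out := by
  induction items with
  | nil => intro out; simp [pvSetFold]
  | cons pr t ih =>
    intro out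
    have hstep : (PySem.List.enumerate pr.2 0).foldl
        (fun (out : List (Option String)) q =>
          out.set q.2.toNat
            (some (if q.1 = 0 then pr.1 else pr.1 ++ "." ++ PySem.Int.toStr q.1)))
        out
      = pvSetFold ((pvEnum columns pr.1 0 0).map
          (fun q => (q.2.toNat, some (pvValI pr.1 q.1)))) out := by
      rw [h pr List.mem_cons_self, pvEnum_spec columns pr.1 0 0, pvSetFold, List.foldl_map]
      rfl
    rw [List.foldl_cons, List.flatMap_cons, pvSetFold_append, hstep,
      ih (fun q hq => h q (List.mem_cons_of_mem pr hq))]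

lemma pvB_eq (columns : List String) :
    make_unique_column_names_alt columns
      = (List.range columns.length).map (fun j => pvExpAt columns j) := by
  set P := (PySem.List.enumerate columns 0).foldl
      (fun d p => d.modify p.2 [] (fun l => l ++ [p.1])) PySem.Dict.empty with hP
  have hdef : make_unique_column_names_alt columns
      = (P.items.foldl
          (fun out pr =>
            (PySem.List.enumerate pr.2 0).foldl
              (fun (out : List (Option String)) q =>
                out.set q.2.toNat
                  (some (if q.1 = 0 then pr.1 else pr.1 ++ "." ++ PySem.Int.toStr q.1)))
              out)
          (List.replicate columns.length none)).map (fun o => o.getD "") := rfl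
  have hnd : P.keys.Nodup := by
    rw [hP]
    exact PySem.Dict.nodup_keys_foldl_modify_key (PySem.List.enumerate columns 0)
      (fun p => p.2) [] (fun _ p => fun l => l ++ [p.1]) PySem.Dict.empty
      (by rw [PySem.Dict.keys_empty]; exact List.nodup_nil)
  have hkeys : P.keys = PySem.Set.ofList columns := by
    rw [hP, PySem.Dict.keys_foldl_modify_key (PySem.List.enumerate columns 0)
      (fun p => p.2) [] (fun _ p => fun l => l ++ [p.1]) PySem.Dict.empty]
    rw [pvEnumerate_snd columns 0]
    rfl
  have hgetD : ∀ c, P.getD c [] = pvIdxFrom columns c 0 := by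
    intro c
    have hswap : P = ((PySem.List.enumerate columns 0).map Prod.swap).foldl
        (fun d p => d.modify p.1 [] (fun l => l ++ [p.2])) PySem.Dict.empty := by
      rw [hP, List.foldl_map]
      exact PySem.List.foldl_congr_mem _ _ _ _ (fun acc p _ => by simp)
    rw [hswap, PySem.Dict.getD_foldl_modify_append, PySem.Dict.getD_empty,
      List.nil_append, List.filter_map, List.map_map]
    unfold pvIdxFrom
    refine congrArg _ (List.filter_congr (fun p hp => ?_))
    simp [Function.comp]
  have hitems : P.items = (PySem.Set.ofList columns).map
      (fun c => (c, pvIdxFrom columns c 0)) := by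
    rw [PySem.Dict.items_eq_map_keys P hnd [], hkeys]
    exact List.map_congr_left (fun c _ => by rw [hgetD])
  rw [hdef, hitems,
    pvOuter columns _ (by
      intro pr hpr
      rcases List.mem_map.mp hpr with ⟨c, _, rfl⟩
      rfl)]
  have hflat : ((PySem.Set.ofList columns).map (fun c => (c, pvIdxFrom columns c 0))).flatMap
      (fun pr => (pvEnum columns pr.1 0 0).map (fun q => (q.2.toNat, some (pvValI pr.1 q.1))))
      = pvW columns := by
    rw [List.flatMap_map]
    rfl
  rw [hflat]
  refine List.ext_getElem? (fun j => ?_)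
  by_cases hj : j < columns.length
  · rw [List.getElem?_map,
      pvSetFold_get_of_mem (pvW columns) _ j _ (pvW_nodup columns) (pvW_mem columns j hj)
        (by simpa using hj),
      List.getElem?_map, List.getElem?_range hj]
    rfl
  · have h1 : (pvSetFold (pvW columns) (List.replicate columns.length none)).length ≤ j := by
      rw [pvSetFold_length, List.length_replicate]
      omega
    rw [List.getElem?_map, List.getElem?_map, List.getElem?_eq_none h1,
      List.getElem?_eq_none (by simpa using Nat.le_of_not_lt hj)]
    rfl

-- ===== VERDICT (by name: the statement is the Claim_ definition above) =====
theorem make_unique_column_names_spec : Claim_equal_make_unique_column_names := by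
  intro columns _
  unfold Spec_make_unique_column_names
  rw [pvA_eq, pvB_eq]
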